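-- pv_equiv track=rewrite | github.com/stunme/BioData | ROSALIND_Solution_Code/DNASeq.py | findProteins
-- ===== SOURCE A (Python) =====
-- def findProteins(aaSeq):
--     proteins = []
--     end, start = 0,0
--     for i in range(len(aaSeq)-1,0,-1):
--         if aaSeq[i] == '_':
--             end = i
--         elif aaSeq[i]=='M' and end > 0:
--             proteins.append(aaSeq[i:end])
--     return [seq for seq in proteins[::-1]]
-- ===== SOURCE B (Python) =====
-- def findProteins(aaSeq):
--     proteins = []
--     for i in range(1, len(aaSeq)):
--         if aaSeq[i] == 'M':
--             end = aaSeq.find('_', i)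
--             if end != -1:
--                 proteins.append(aaSeq[i:end])
--     return proteins
-- ===== Notes on version B (the rewrite author's own statement) =====
-- stated objective: idiomatic
-- what changed: Replaces A's backward scan that maintains a running end position for the nearest stop marker and reverses the collected list at the end with a forward loop that, at each start residue past index 0, locates the nearest stop via str.find with a start offset and appends the slice directly, needing no reversal.
import Mathlib
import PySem

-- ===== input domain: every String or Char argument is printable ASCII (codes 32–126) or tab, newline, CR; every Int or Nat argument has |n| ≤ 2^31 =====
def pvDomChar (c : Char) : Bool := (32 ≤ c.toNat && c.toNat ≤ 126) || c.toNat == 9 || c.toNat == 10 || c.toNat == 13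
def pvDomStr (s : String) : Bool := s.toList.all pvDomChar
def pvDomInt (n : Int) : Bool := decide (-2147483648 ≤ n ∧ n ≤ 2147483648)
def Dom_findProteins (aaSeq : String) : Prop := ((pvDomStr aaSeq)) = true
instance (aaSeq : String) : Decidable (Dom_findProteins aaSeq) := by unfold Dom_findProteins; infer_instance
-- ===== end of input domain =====

-- B replaces A's backward pass with a running end marker (plus a final reversal) by a forward
-- loop that calls str.find with a start offset at each start residue; objective: more idiomatic, no reversal.

-- ===== PORT A =====
-- the backward 'for i in range(len(aaSeq)-1, 0, -1)' as structural recursion on i (i counts down to 1)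
def findProteinsLoopA (cs : List Char) : Nat → Int → List String → List String
  | 0, _, ps => ps
  | i+1, e, ps =>
    match PySem.List.pyGet? cs ((i : Int) + 1) with
    | none => ps   -- unreachable: the loop only visits in-range indices
    | some ch =>
      if ch = '_' then findProteinsLoopA cs i ((i : Int) + 1) ps
      else if ch = 'M' ∧ e > 0 then
        findProteinsLoopA cs i e (ps ++ [String.ofList (PySem.List.slice cs (some ((i : Int) + 1)) (some e))])
      else findProteinsLoopA cs i e ps

def findProteins (aaSeq : String) : List String :=
  let cs := aaSeq.toList
  -- '[seq for seq in proteins[::-1]]' : proteins[::-1] is reverse (PySem.List.slice?_none_none_neg_one)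
  (findProteinsLoopA cs (cs.length - 1) 0 []).reverse

-- ===== PORT B =====
-- the body of B's forward 'for i in range(1, len(aaSeq))' loop
def findProteinsStepB (cs : List Char) (ps : List String) (i : Int) : List String :=
  match PySem.List.pyGet? cs i with
  | none => ps   -- unreachable: the loop only visits in-range indices
  | some ch =>
    if ch = 'M' then
      let e := PySem.Chars.findFrom cs ['_'] i none
      if e ≠ -1 then ps ++ [String.ofList (PySem.List.slice cs (some i) (some e))] else ps
    else ps

def findProteins_alt (aaSeq : String) : List String :=
  let cs := aaSeq.toList
  (PySem.List.pyRange 1 (cs.length : Int) 1).foldl (findProteinsStepB cs) []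

-- ===== PRECONDITION & SPEC =====
def Spec_findProteins (aaSeq : String) (out : List String) : Prop := out = findProteins_alt aaSeq
instance (aaSeq : String) (out : List String) : Decidable (Spec_findProteins aaSeq out) := by unfold Spec_findProteins; infer_instance

-- ===== CLAIM (what is proved, stated in full; the proofs are below) =====
def Claim_equal_findProteins : Prop := ∀ (aaSeq : String), Dom_findProteins aaSeq → Spec_findProteins aaSeq (findProteins aaSeq)

-- ===== LEMMAS AND PROOFS =====

-- "not a stop marker"
def pKeep (x : Char) : Bool := x ≠ '_'

-- common reference: the protein emitted at index j (if any), and the ascending list over indices 1..i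
def pEntry (cs : List Char) (j : Nat) : List String :=
  if (cs.drop j).head? = some 'M' ∧ '_' ∈ cs.drop j
  then [String.ofList ((cs.drop j).takeWhile pKeep)] else []

def pSpec (cs : List Char) : Nat → List String
  | 0 => []
  | j+1 => pSpec cs j ++ pEntry cs (j+1)

lemma pKeep_iff (x : Char) : pKeep x = true ↔ x ≠ '_' := by simp [pKeep]

lemma singleton_prefix_iff {α : Type} (a : α) (l : List α) : [a] <+: l ↔ l.head? = some a := by
  cases l with
  | nil => simp
  | cons b t =>
    constructor
    · rintro ⟨r, hr⟩; simp at hr; simp [hr.1]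
    · intro h; simp at h; exact ⟨t, by simp [h]⟩

lemma mem_iff_singleton_infix {α : Type} (a : α) (l : List α) : a ∈ l ↔ [a] <:+: l := by
  constructor
  · intro h
    obtain ⟨s, t, hst⟩ := List.append_of_mem h
    exact ⟨s, t, by simp [hst]⟩
  · intro h
    have := h.sublist
    simpa using this.subset (by simp)

lemma takeWhile_len_eq (l : List Char) (t : Nat) (ht : l[t]? = some '_')
    (hb : ∀ i, i < t → l[i]? ≠ some '_') : (l.takeWhile pKeep).length = t := by
  induction l generalizing t with
  | nil => simp at ht
  | cons a r ih =>
    cases t with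
    | zero =>
      simp at ht
      rw [List.takeWhile_cons, if_neg (by simp [pKeep, ht])]
      simp
    | succ t =>
      have ha : a ≠ '_' := by
        have := hb 0 (by omega); simpa using this
      rw [List.takeWhile_cons, if_pos ((pKeep_iff a).2 ha)]
      have := ih t (by simpa using ht) (fun i hi => by
        have := hb (i+1) (by omega); simpa using this)
      simp [this]

-- find of a single '_' points at the end of the '_'-free prefix
lemma find_underscore (l : List Char) (h : '_' ∈ l) :
    PySem.Chars.find l ['_'] = ((l.takeWhile pKeep).length : Int) := by
  have hinf : ['_'] <:+: l := (mem_iff_singleton_infix _ _).1 h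
  have hpos : 0 ≤ PySem.Chars.find l ['_'] := (PySem.Chars.find_nonneg_iff l ['_']).2 hinf
  obtain ⟨h1, h2⟩ := PySem.Chars.find_spec hpos
  have ht : l[(PySem.Chars.find l ['_']).toNat]? = some '_' := by
    have := (singleton_prefix_iff '_' _).1 h1
    rwa [List.head?_drop] at this
  have := takeWhile_len_eq l (PySem.Chars.find l ['_']).toNat ht (fun i hi hc => by
    refine h2 i hi ((singleton_prefix_iff '_' _).2 ?_)
    rwa [List.head?_drop])
  omega

lemma take_takeWhile_len (l : List Char) :
    l.take ((l.takeWhile pKeep).length) = l.takeWhile pKeep :=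
  (List.prefix_iff_eq_take.1 (List.takeWhile_prefix _)).symm

-- the running `end` of A when index j is next to be considered: first stop at index ≥ j, 0 if none
def fsInt (cs : List Char) (j : Nat) : Int :=
  if '_' ∈ cs.drop j then (j : Int) + ((cs.drop j).takeWhile pKeep).length else 0

lemma head?_drop_of_lt (cs : List Char) (j : Nat) (hj : j < cs.length) :
    (cs.drop j).head? = some (cs[j]'hj) := by
  rw [List.head?_drop, List.getElem?_eq_getElem hj]

lemma pEntry_val (cs : List Char) (j : Nat) (hj : j < cs.length) (hM : cs[j]'hj = 'M')
    (hm : '_' ∈ cs.drop j) :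
    pEntry cs j = [String.ofList ((cs.drop j).takeWhile pKeep)] := by
  rw [pEntry, if_pos ⟨by rw [head?_drop_of_lt cs j hj, hM], hm⟩]

lemma pEntry_nil_of_not_M (cs : List Char) (j : Nat) (hj : j < cs.length) (hM : ¬ cs[j]'hj = 'M') :
    pEntry cs j = [] := by
  rw [pEntry, if_neg]
  rintro ⟨h1, -⟩
  rw [head?_drop_of_lt cs j hj] at h1
  exact hM (by simpa using h1)

lemma pEntry_nil_of_no_stop (cs : List Char) (j : Nat) (hm : '_' ∉ cs.drop j) :
    pEntry cs j = [] := by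
  rw [pEntry, if_neg]; rintro ⟨-, h2⟩; exact hm h2

lemma slice_eq_takeWhile (cs : List Char) (j : Nat) (hm : '_' ∈ cs.drop j) :
    PySem.List.slice cs (some (j : Int)) (some (fsInt cs j)) = (cs.drop j).takeWhile pKeep := by
  have h0 : fsInt cs j = ((j + ((cs.drop j).takeWhile pKeep).length : Nat) : Int) := by
    rw [fsInt, if_pos hm]; push_cast; ring
  rw [h0, PySem.List.slice_natCast]
  rw [Nat.add_sub_cancel_left, take_takeWhile_len]

lemma tw_drop_cons (cs : List Char) (j : Nat) (hj : j < cs.length) (h : cs[j]'hj ≠ '_') :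
    (cs.drop j).takeWhile pKeep = (cs[j]'hj) :: (cs.drop (j+1)).takeWhile pKeep := by
  rw [List.drop_eq_getElem_cons hj, List.takeWhile_cons, if_pos ((pKeep_iff _).2 h)]

lemma mem_drop_cons (cs : List Char) (j : Nat) (hj : j < cs.length) (h : cs[j]'hj ≠ '_') :
    '_' ∈ cs.drop j ↔ '_' ∈ cs.drop (j+1) := by
  rw [List.drop_eq_getElem_cons hj]
  simp only [List.mem_cons]
  constructor
  · intro hmem
    rcases hmem with h1 | h2
    · exact absurd h1.symm h
    · exact h2
  · exact Or.inr

lemma fsInt_cons (cs : List Char) (j : Nat) (hj : j < cs.length) (hch : cs[j]'hj ≠ '_') :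
    fsInt cs j = fsInt cs (j+1) := by
  by_cases hm : '_' ∈ cs.drop (j+1)
  · have hm' : '_' ∈ cs.drop j := (mem_drop_cons cs j hj hch).2 hm
    rw [fsInt, fsInt, if_pos hm', if_pos hm, tw_drop_cons cs j hj hch]
    simp only [List.length_cons]
    push_cast; ring
  · have hm' : '_' ∉ cs.drop j := fun h => hm ((mem_drop_cons cs j hj hch).1 h)
    rw [fsInt, fsInt, if_neg hm', if_neg hm]

lemma fsInt_pos_iff (cs : List Char) (j : Nat) :
    0 < fsInt cs j ↔ ('_' ∈ cs.drop j ∧ 0 < j + ((cs.drop j).takeWhile pKeep).length) := by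
  rw [fsInt]
  split_ifs with hm
  · constructor
    · intro h; exact ⟨hm, by exact_mod_cast h⟩
    · intro h; exact_mod_cast h.2
  · simp [hm]

lemma loopA_inv (cs : List Char) (i : Nat) (hi : i < cs.length) (ps : List String) :
    findProteinsLoopA cs i (fsInt cs (i+1)) ps = ps ++ (pSpec cs i).reverse := by
  induction i generalizing ps with
  | zero => simp [findProteinsLoopA, pSpec]
  | succ i ih =>
    have hlt : i + 1 < cs.length := hi
    have hget : PySem.List.pyGet? cs ((i : Int) + 1) = some (cs[i+1]'hlt) := by
      have h1 : ((i : Int) + 1) = ((i + 1 : Nat) : Int) := by push_cast; ring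
      rw [h1, PySem.List.pyGet?_natCast, List.getElem?_eq_getElem hlt]
    by_cases hus : cs[i+1]'hlt = '_'
    · -- '_' branch: end := i+1
      have hm : '_' ∈ cs.drop (i+1) := by
        rw [List.drop_eq_getElem_cons hlt, hus]; simp
      have he : ((i : Int) + 1) = fsInt cs (i+1) := by
        rw [fsInt, if_pos hm, List.drop_eq_getElem_cons hlt, List.takeWhile_cons,
          if_neg (by simp [pKeep, hus])]
        simp
      have hent : pEntry cs (i+1) = [] := pEntry_nil_of_not_M cs (i+1) hlt (by rw [hus]; decide)
      rw [findProteinsLoopA, hget]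
      simp only [if_pos hus, he]
      rw [ih (by omega) ps]
      simp [pSpec, hent]
    · have hfs : fsInt cs (i+2) = fsInt cs (i+1) := (fsInt_cons cs (i+1) hlt hus).symm
      by_cases hM : cs[i+1]'hlt = 'M' ∧ 0 < fsInt cs (i+1)
      · -- append branch
        have hm1 : '_' ∈ cs.drop (i+1) := ((fsInt_pos_iff cs (i+1)).1 hM.2).1
        have hsl : PySem.List.slice cs (some ((i : Int) + 1)) (some (fsInt cs (i+1)))
            = (cs.drop (i+1)).takeWhile pKeep := by
          have h1 : ((i : Int) + 1) = ((i + 1 : Nat) : Int) := by push_cast; ring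
          rw [h1, slice_eq_takeWhile cs (i+1) hm1]
        rw [findProteinsLoopA, hget]
        simp only [hfs, if_neg hus, if_pos hM, hsl]
        rw [ih (by omega)]
        rw [pSpec, pEntry_val cs (i+1) hlt hM.1 hm1]
        simp
      · -- skip branch
        have hent : pEntry cs (i+1) = [] := by
          by_cases hM' : cs[i+1]'hlt = 'M'
          · have hnm : ¬ 0 < fsInt cs (i+1) := fun h => hM ⟨hM', h⟩
            exact pEntry_nil_of_no_stop cs (i+1)
              (fun hmem => hnm ((fsInt_pos_iff cs (i+1)).2 ⟨hmem, by omega⟩))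
          · exact pEntry_nil_of_not_M cs (i+1) hlt hM'
        rw [findProteinsLoopA, hget]
        simp only [hfs, if_neg hus, if_neg hM]
        rw [ih (by omega)]
        simp [pSpec, hent]

lemma findProteins_eq_pSpec (s : String) :
    findProteins s = pSpec s.toList (s.toList.length - 1) := by
  unfold findProteins
  set cs := s.toList with hc
  cases hn : cs.length with
  | zero =>
    have hnil : cs = [] := List.length_eq_zero_iff.1 hn
    simp [hnil, findProteinsLoopA, pSpec]
  | succ n =>
    have h0 : fsInt cs (n + 1) = 0 := by
      have hd : cs.drop (n+1) = [] := List.drop_eq_nil_of_le (by omega)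
      rw [fsInt, hd]; simp
    have hA := loopA_inv cs n (by omega) []
    rw [h0] at hA
    simp only [hn]
    simp [hA]

-- B side: one loop iteration adds exactly the entry at its index
lemma stepB_eq (cs : List Char) (m : Nat) (hm : m < cs.length) (ps : List String) :
    findProteinsStepB cs ps (m : Int) = ps ++ pEntry cs m := by
  rw [findProteinsStepB, PySem.List.pyGet?_natCast, List.getElem?_eq_getElem hm]
  by_cases hM : cs[m]'hm = 'M'
  · simp only [hM, if_pos]
    rw [PySem.Chars.findFrom_natCast cs ['_'] m (by omega)]
    by_cases hmem : '_' ∈ cs.drop m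
    · have hfind : PySem.Chars.find (cs.drop m) ['_'] = (((cs.drop m).takeWhile pKeep).length : Int) :=
        find_underscore _ hmem
      have hne : PySem.Chars.find (cs.drop m) ['_'] ≠ -1 := by rw [hfind]; omega
      rw [if_neg hne, hfind]
      have hne2 : (m : Int) + (((cs.drop m).takeWhile pKeep).length : Int) ≠ -1 := by omega
      rw [if_pos hne2]
      have hsl : PySem.List.slice cs (some (m : Int))
          (some ((m : Int) + (((cs.drop m).takeWhile pKeep).length : Int)))
          = (cs.drop m).takeWhile pKeep := by
        have h0 : (m : Int) + (((cs.drop m).takeWhile pKeep).length : Int)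
            = fsInt cs m := by rw [fsInt, if_pos hmem]
        rw [h0, slice_eq_takeWhile cs m hmem]
      rw [hsl, pEntry_val cs m hm hM hmem]
    · have hni : ¬ ['_'] <:+: cs.drop m := fun h => hmem ((mem_iff_singleton_infix _ _).2 h)
      have hfind : PySem.Chars.find (cs.drop m) ['_'] = -1 :=
        (PySem.Chars.find_eq_neg_one_iff _ _).2 hni
      rw [if_pos hfind, pEntry_nil_of_no_stop cs m hmem]
      simp
  · simp only [if_neg hM]
    rw [pEntry_nil_of_not_M cs m hm hM]
    simp
lemma foldB_inv (cs : List Char) (m : Nat) (hm : m ≤ cs.length) (ps : List String) :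
    (PySem.List.pyRange 1 (m : Int) 1).foldl (findProteinsStepB cs) ps = ps ++ pSpec cs (m - 1) := by
  induction m generalizing ps with
  | zero => simp [PySem.List.pyRange_one_eq_nil, pSpec]
  | succ m ih =>
    cases m with
    | zero =>
      rw [PySem.List.pyRange_one_eq_nil (by norm_num)]
      simp [pSpec]
    | succ k =>
      have h1 : (1 : Int) ≤ ((k+1 : Nat) : Int) := by push_cast; omega
      have hr : PySem.List.pyRange 1 ((k+1+1 : Nat) : Int) 1
          = PySem.List.pyRange 1 ((k+1 : Nat) : Int) 1 ++ [((k+1 : Nat) : Int)] := by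
        have h2 : ((k+1+1 : Nat) : Int) = ((k+1 : Nat) : Int) + 1 := by push_cast; ring
        rw [h2, PySem.List.pyRange_one_succ_right h1]
      rw [hr, List.foldl_append, ih (by omega) ps]
      simp only [List.foldl_cons, List.foldl_nil]
      rw [stepB_eq cs (k+1) (by omega)]
      simp [pSpec]

-- ===== VERDICT (by name: the statement is the Claim_ definition above) =====
theorem findProteins_spec : Claim_equal_findProteins := by
  intro s _
  unfold Spec_findProteins findProteins_alt
  rw [findProteins_eq_pSpec]
  rw [foldB_inv s.toList s.toList.length (le_refl _) []]
  simp
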